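-- pv_equiv track=rewrite | github.com/marioncandau/famfoot-scripts | classement des buteuses/generate_ranking_R2Sud.py | Get_nth_field
-- ===== SOURCE A (Python) =====
-- def Get_nth_field(ligne,nb):
--     switch = '0' ;
--     retour = "" ;
--     i_nb = 0 ;
--     for i in ligne:
--         if (i!='\t'):
--             if (switch=='0'):
--                 switch='1'    ;
--                 i_nb = i_nb+1 ;
--             if (switch=='1'):
--                 if (i_nb == nb and i != '\n'):
--                     retour=retour+i ;
--         else:
--             if (switch=='1'):
--                 switch='0';
--     return retour ;
-- ===== SOURCE B (Python) =====
-- def Get_nth_field(ligne, nb):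
--     fields = [f for f in ligne.split('\t') if f != '']
--     if 1 <= nb <= len(fields):
--         return fields[nb - 1].replace('\n', '')
--     return ''
-- ===== Notes on version B (the rewrite author's own statement) =====
-- stated objective: simpler
-- what changed: Replaced A's char-by-char switch/counter state machine with a whole-line decomposition: split on tab, filter out empty fields, then 1-based index and strip newlines from the selected field.
import Mathlib
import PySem

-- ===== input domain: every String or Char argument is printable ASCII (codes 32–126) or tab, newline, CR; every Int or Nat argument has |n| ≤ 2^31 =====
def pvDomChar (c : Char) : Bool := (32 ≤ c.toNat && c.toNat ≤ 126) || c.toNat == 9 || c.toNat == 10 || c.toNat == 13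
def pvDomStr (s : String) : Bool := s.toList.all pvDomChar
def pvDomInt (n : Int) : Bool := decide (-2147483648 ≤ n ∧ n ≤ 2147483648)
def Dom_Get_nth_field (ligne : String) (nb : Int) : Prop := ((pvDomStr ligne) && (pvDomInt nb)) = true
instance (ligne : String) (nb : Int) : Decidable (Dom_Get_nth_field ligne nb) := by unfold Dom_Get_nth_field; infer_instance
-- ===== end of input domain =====

-- B replaces A's char-by-char switch/counter state machine by a split-then-filter-then-index
-- decomposition (objective: simpler); same return value on every input.

-- ===== PORT A =====
-- the for-loop of A: state (switch, i_nb, retour); retour kept as List Char, String.ofList at the end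
def Get_nth_field_goA (nb : Int) : List Char → Char → Int → List Char → List Char
  | [], _, _, retour => retour
  | i :: rest, switch, i_nb, retour =>
    if i ≠ '\t' then
      let switch' := if switch == '0' then '1' else switch
      let i_nb' := if switch == '0' then i_nb + 1 else i_nb
      let retour' := if switch' == '1' then
          (if i_nb' == nb && i != '\n' then retour ++ [i] else retour)
        else retour
      Get_nth_field_goA nb rest switch' i_nb' retour'
    else
      Get_nth_field_goA nb rest (if switch == '1' then '0' else switch) i_nb retour

def Get_nth_field (ligne : String) (nb : Int) : String :=
  String.ofList (Get_nth_field_goA nb ligne.toList '0' 0 [])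

-- ===== PORT B =====
-- ligne.split('\t') ported as List.splitOn '\t'; .replace('\n','') removes every newline,
-- ported exactly as a filter; 1-based in-range index fields[nb-1] as getD (nb-1).toNat
def Get_nth_field_alt (ligne : String) (nb : Int) : String :=
  let fields := (ligne.toList.splitOn '\t').filter (fun f => f ≠ [])
  if 1 ≤ nb ∧ nb ≤ (fields.length : Int) then
    String.ofList ((fields.getD (nb - 1).toNat []).filter (fun c => c ≠ '\n'))
  else ""

-- ===== PRECONDITION & SPEC =====
def Spec_Get_nth_field (ligne : String) (nb : Int) (out : String) : Prop := out = Get_nth_field_alt ligne nb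
instance (ligne : String) (nb : Int) (out : String) : Decidable (Spec_Get_nth_field ligne nb out) := by unfold Spec_Get_nth_field; infer_instance

-- ===== CLAIM (what is proved, stated in full; the proofs are below) =====
def Claim_equal_Get_nth_field : Prop := ∀ (ligne : String) (nb : Int), Dom_Get_nth_field ligne nb → Spec_Get_nth_field ligne nb (Get_nth_field ligne nb)

-- ===== LEMMAS AND PROOFS =====

-- the value selected among a list of fields when the running count stands at k
def pvPick (nb k : Int) (fs : List (List Char)) : List Char :=
  if 1 ≤ nb - k ∧ nb - k ≤ (fs.length : Int) then
    (fs.getD (nb - k - 1).toNat []).filter (fun c => c ≠ '\n')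
  else []

-- what A's loop still produces from state (switch = if b then '1' else '0', count k)
def pvSel (nb : Int) (b : Bool) (k : Int) (cs : List Char) : List Char :=
  if b then
    (if k = nb then ((cs.splitOn '\t').headD []).filter (fun c => c ≠ '\n') else [])
      ++ pvPick nb k (((cs.splitOn '\t').tail).filter (fun f => f ≠ []))
  else pvPick nb k ((cs.splitOn '\t').filter (fun f => f ≠ []))

lemma splitOn_tab_ne_nil (cs : List Char) : cs.splitOn '\t' ≠ [] := by
  simpa [List.splitOn] using List.splitOnP_ne_nil (fun c => c == '\t') cs

lemma splitOn_tab_cons (c : Char) (cs : List Char) :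
    List.splitOn '\t' (c :: cs) =
      if c = '\t' then [] :: List.splitOn '\t' cs
      else (List.splitOn '\t' cs).modifyHead (List.cons c) := by
  simp [List.splitOn, List.splitOnP_cons]

lemma pvPick_cons (nb k : Int) (f : List Char) (T : List (List Char)) :
    pvPick nb k (f :: T) =
      if nb - k = 1 then f.filter (fun c => c ≠ '\n') else pvPick nb (k + 1) T := by
  unfold pvPick
  by_cases h1 : nb - k = 1
  · simp [h1]
  · rw [if_neg h1]
    by_cases h2 : 1 ≤ nb - (k + 1) ∧ nb - (k + 1) ≤ (T.length : Int)
    · have h2a : 1 ≤ nb - k ∧ nb - k ≤ (((f :: T).length : Nat) : Int) := by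
        simp only [List.length_cons]; push_cast; omega
      rw [if_pos h2a, if_pos h2]
      have hidx : (nb - k - 1).toNat = (nb - (k + 1) - 1).toNat + 1 := by omega
      rw [hidx]
      simp
    · have h2a : ¬ (1 ≤ nb - k ∧ nb - k ≤ (((f :: T).length : Nat) : Int)) := by
        simp only [List.length_cons]; push_cast; push_cast at h2; omega
      rw [if_neg h2a, if_neg h2]

lemma pvSel_nil (nb : Int) (b : Bool) (k : Int) : pvSel nb b k [] = [] := by
  cases b <;> simp [pvSel, pvPick, List.splitOn]

lemma pvSel_tab (nb : Int) (b : Bool) (k : Int) (cs : List Char) :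
    pvSel nb b k ('\t' :: cs) = pvSel nb false k cs := by
  obtain ⟨h, t, hht⟩ := List.exists_cons_of_ne_nil (splitOn_tab_ne_nil cs)
  cases b <;> simp [pvSel, splitOn_tab_cons, hht]

lemma pvPick_nonpos (nb k : Int) (fs : List (List Char)) (h : nb - k ≤ 0) :
    pvPick nb k fs = [] := by
  unfold pvPick; rw [if_neg]; omega

lemma pvSel_cons (nb : Int) (b : Bool) (k : Int) (c : Char) (cs : List Char) (hc : c ≠ '\t') :
    pvSel nb b k (c :: cs) =
      (if (if b then k else k + 1) = nb ∧ c ≠ '\n' then [c] else [])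
        ++ pvSel nb true (if b then k else k + 1) cs := by
  obtain ⟨h, t, hht⟩ := List.exists_cons_of_ne_nil (splitOn_tab_ne_nil cs)
  have hsp : List.splitOn '\t' (c :: cs) = (c :: h) :: t := by
    simp [splitOn_tab_cons, hc, hht]
  cases b with
  | true =>
    simp only [pvSel, hsp, hht, List.headD_cons, List.tail_cons, if_true]
    by_cases hk : k = nb <;> by_cases hn : c = '\n' <;>
      simp [hk, hn]
  | false =>
    have hL : pvSel nb false k (c :: cs)
        = pvPick nb k ((List.splitOn '\t' (c :: cs)).filter (fun f => f ≠ [])) := rfl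
    rw [hL, hsp, List.filter_cons_of_pos (by simp), pvPick_cons]
    by_cases h1 : nb - k = 1
    · have hk : k + 1 = nb := by omega
      rw [if_pos h1]
      simp [pvSel, hht, hk]
      by_cases hn : c = '\n' <;> simp [hn] <;>
        exact pvPick_nonpos nb nb _ (by omega)
    · have hk : ¬ (k + 1 = nb) := by omega
      rw [if_neg h1]
      simp [pvSel, hht, hk]

lemma goA_eq (nb : Int) (cs : List Char) : ∀ (b : Bool) (k : Int) (ret : List Char),
    Get_nth_field_goA nb cs (if b then '1' else '0') k ret = ret ++ pvSel nb b k cs := by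
  induction cs with
  | nil => intro b k ret; cases b <;> simp [Get_nth_field_goA, pvSel_nil]
  | cons c cs ih =>
    intro b k ret
    by_cases hc : c = '\t'
    · subst hc
      rw [pvSel_tab]
      cases b <;> simpa [Get_nth_field_goA] using ih false k ret
    · rw [pvSel_cons nb b k c cs hc]
      cases b with
      | true =>
        have := ih true k (if (k == nb && c != '\n') then ret ++ [c] else ret)
        simp only [Get_nth_field_goA, if_pos hc]
        by_cases hk : k = nb <;> by_cases hn : c = '\n' <;>
          simp_all
      | false =>
        simp only [Get_nth_field_goA, if_pos hc]
        by_cases hk : k + 1 = nb <;> by_cases hn : c = '\n' <;>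
          simp_all

-- ===== VERDICT (by name: the statement is the Claim_ definition above) =====
theorem Get_nth_field_spec : Claim_equal_Get_nth_field := by
  intro ligne nb _
  unfold Spec_Get_nth_field Get_nth_field Get_nth_field_alt
  have h := goA_eq nb ligne.toList false 0 []
  simp only [if_neg (by decide : ¬ (false = true))] at h
  rw [show ('0' : Char) = (if false = true then '1' else '0') from rfl, goA_eq nb ligne.toList false 0 []]
  simp only [List.nil_append, pvSel, if_neg (Bool.false_ne_true), pvPick, sub_zero]
  split_ifs <;> rfl
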